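-- pv_equiv track=rewrite | github.com/g0faq/PyPy | ЕГЭ_26-41.py | F
-- ===== SOURCE A (Python) =====
-- def F(sp_1, m):
--     sp_1.sort()
--     sp_2, sp_3 = [], []
--     count = 0
--     total = 0
--
--     for elem in sp_1:
--         if elem + total <= m:
--             total += elem
--             count += 1
--             sp_2.append(elem)
--         else:
--             sp_3.append(elem)
--
--     sp_1, sp_2, sp_3 = sp_1[::-1], sp_2[::-1], sp_3[::-1]
--
--     if sum(sp_2) - max(sp_2) + max(sp_3) <= m:
--         return [count, max(sp_3)]
-- ===== SOURCE B (Python) =====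
-- def F(sp_1, m):
--     # Equivalence is about the return value; like A, this sorts sp_1 in place.
--     sp_1.sort()
--     prefix = []
--     t = 0
--     for x in sp_1:
--         t += x
--         prefix.append(t)
--     hull = []  # running maxima of the prefix sums (nondecreasing)
--     for p in prefix:
--         hull.append(p if not hull else max(hull[-1], p))
--     count = sum(1 for h in hull if h <= m)
--     sp_2, sp_3 = sp_1[:count], sp_1[count:]
--     if sum(sp_2) - max(sp_2) + max(sp_3) <= m:
--         return [count, max(sp_3)]
-- ===== Notes on version B (the rewrite author's own statement) =====
-- stated objective: alternative
-- what changed: Replaces A's branching greedy loop over four accumulators by a prefix-sum table with a running-max hull, a threshold count of hull entries within budget, and list slicing for the two parts; the final swap check is unchanged.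
import Mathlib
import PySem

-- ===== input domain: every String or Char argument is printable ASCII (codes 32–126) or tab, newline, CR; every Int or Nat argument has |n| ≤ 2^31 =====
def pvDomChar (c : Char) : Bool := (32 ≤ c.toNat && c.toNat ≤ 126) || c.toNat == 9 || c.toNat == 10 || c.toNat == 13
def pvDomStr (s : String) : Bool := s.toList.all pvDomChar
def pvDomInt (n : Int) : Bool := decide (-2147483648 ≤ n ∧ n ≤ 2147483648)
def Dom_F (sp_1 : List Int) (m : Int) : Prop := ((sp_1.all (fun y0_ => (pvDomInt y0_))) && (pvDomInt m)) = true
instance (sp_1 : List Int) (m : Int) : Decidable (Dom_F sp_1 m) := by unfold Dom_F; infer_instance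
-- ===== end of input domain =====

-- B replaces A's branching greedy loop by prefix sums + running-max hull + a threshold count and slicing
-- (same asymptotic cost; the equivalence proved is about the RETURN value — both A and B sort sp_1 in place).

-- ===== PORT A =====
-- the body of A's for-loop: state (sp_2, sp_3, count, total)
def AStep (m : Int) (acc : List Int × List Int × Int × Int) (elem : Int) :
    List Int × List Int × Int × Int :=
  if elem + acc.2.2.2 ≤ m then (acc.1 ++ [elem], acc.2.1, acc.2.2.1 + 1, acc.2.2.2 + elem)
  else (acc.1, acc.2.1 ++ [elem], acc.2.2.1, acc.2.2.2)

def F (sp_1 : List Int) (m : Int) : Option (List Int) :=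
  let s := PySem.List.sorted sp_1 (fun x => x) false   -- sp_1.sort()
  let st := s.foldl (AStep m) ([], [], 0, 0)
  -- sp_1[::-1] is computed by Python but never used afterwards; sp_2[::-1], sp_3[::-1]:
  let sp_2 := st.1.reverse
  let sp_3 := st.2.1.reverse
  let count := st.2.2.1
  -- max() on an empty list raises ValueError (excluded by Pre_F): none here
  match PySem.List.max? sp_2 (fun x => x), PySem.List.max? sp_3 (fun x => x) with
  | some mx2, some mx3 =>
      if sp_2.sum - mx2 + mx3 ≤ m then some [count, mx3] else none
  | _, _ => none

-- ===== PORT B =====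
-- prefix-sum loop: state (prefix, t)
def PStep (acc : List Int × Int) (x : Int) : List Int × Int :=
  (acc.1 ++ [acc.2 + x], acc.2 + x)

-- hull loop: hull.append(p if not hull else max(hull[-1], p))
def HStep (h : List Int) (p : Int) : List Int :=
  h ++ [if h = [] then p else max (PySem.List.pyGetD h (-1) 0) p]

def F_alt (sp_1 : List Int) (m : Int) : Option (List Int) :=
  let s := PySem.List.sorted sp_1 (fun x => x) false   -- sp_1.sort()
  let pref := (s.foldl PStep ([], 0)).1
  let hull := pref.foldl HStep []
  let count := hull.countP (fun p => p ≤ m)            -- sum(1 for h in hull if h <= m)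
  let sp_2 := PySem.List.slice s none (some (count : Int))
  let sp_3 := PySem.List.slice s (some (count : Int)) none
  match PySem.List.max? sp_2 (fun x => x) with
  | none => none          -- max() of empty sp_2 raises ValueError (excluded by Pre_F)
  | some mx2 =>
    match PySem.List.max? sp_3 (fun x => x) with
    | none => none        -- max() of empty sp_3 raises ValueError (excluded by Pre_F)
    | some mx3 =>
        if sp_2.sum - mx2 + mx3 ≤ m then some [(count : Int), mx3] else none

-- ===== PRECONDITION & SPEC =====
-- Pre_F excludes exactly the inputs on which A raises ValueError (max() of an empty list):
-- the sorted list must have its smallest element within budget (so sp_2 is nonempty) and some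
-- prefix sum over budget (so sp_3 is nonempty).  B raises ValueError on the same inputs.
def Pre_F (sp_1 : List Int) (m : Int) : Prop :=
  sp_1 ≠ [] ∧
  (PySem.List.sorted sp_1 (fun x => x) false).getD 0 0 ≤ m ∧
  ∃ k < sp_1.length, m < ((PySem.List.sorted sp_1 (fun x => x) false).take (k + 1)).sum
instance (sp_1 : List Int) (m : Int) : Decidable (Pre_F sp_1 m) := by unfold Pre_F; infer_instance

def pvWitness_F : List Int × Int := ([1, 2, 5], 4)

def Spec_F (sp_1 : List Int) (m : Int) (out : Option (List Int)) : Prop := out = F_alt sp_1 m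
instance (sp_1 : List Int) (m : Int) (out : Option (List Int)) : Decidable (Spec_F sp_1 m out) := by unfold Spec_F; infer_instance

-- ===== CLAIM (what is proved, stated in full; the proofs are below) =====
def Claim_equal_F : Prop := ∀ (sp_1 : List Int) (m : Int), Dom_F sp_1 m → Pre_F sp_1 m → Spec_F sp_1 m (F sp_1 m)

-- ===== LEMMAS AND PROOFS =====

-- the greedy cutoff: how many elements A's loop accepts starting from running total t
def gcount (m : Int) : List Int → Int → Nat
  | [], _ => 0
  | x :: r, t => if x + t ≤ m then gcount m r (t + x) + 1 else 0

-- prefix sums starting from t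
def pfx (t : Int) : List Int → List Int
  | [] => []
  | x :: r => (t + x) :: pfx (t + x) r

-- running maxima continuing from current maximum h
def hl (h : Int) : List Int → List Int
  | [] => []
  | p :: r => max h p :: hl (max h p) r

theorem foldl_AStep_reject (m : Int) :
    ∀ (s a2 a3 : List Int) (c t : Int), (∀ x ∈ s, ¬ x + t ≤ m) →
      s.foldl (AStep m) (a2, a3, c, t) = (a2, a3 ++ s, c, t) := by
  intro s
  induction s with
  | nil => intro a2 a3 c t _; simp
  | cons x r ih =>
    intro a2 a3 c t hall
    have hx : ¬ x + t ≤ m := hall x (by simp)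
    simp only [List.foldl_cons, AStep]
    rw [if_neg hx, ih (a2) (a3 ++ [x]) c t (fun y hy => hall y (by simp [hy]))]
    simp

theorem foldl_AStep_main (m : Int) :
    ∀ (s : List Int), s.Pairwise (· ≤ ·) →
      ∀ (a2 a3 : List Int) (c t : Int),
        s.foldl (AStep m) (a2, a3, c, t) =
          (a2 ++ s.take (gcount m s t), a3 ++ s.drop (gcount m s t),
           c + (gcount m s t : Int), t + (s.take (gcount m s t)).sum) := by
  intro s
  induction s with
  | nil => intro _ a2 a3 c t; simp [gcount]
  | cons x r ih =>
    intro hp a2 a3 c t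
    by_cases hx : x + t ≤ m
    · simp only [List.foldl_cons, AStep, gcount]
      rw [if_pos hx, if_pos hx, ih hp.of_cons (a2 ++ [x]) a3 (c + 1) (t + x)]
      simp
      refine ⟨by ring, by ring⟩
    · have hall : ∀ y ∈ x :: r, ¬ y + t ≤ m := by
        intro y hy
        rcases hy with _ | hy
        · exact hx
        · have hxy : x ≤ y := List.rel_of_pairwise_cons hp (by assumption)
          intro hle; exact hx (by omega)
      rw [foldl_AStep_reject m (x :: r) a2 a3 c t hall]
      simp [gcount, hx]

theorem foldl_PStep : ∀ (s a : List Int) (t : Int),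
    (s.foldl PStep (a, t)).1 = a ++ pfx t s := by
  intro s
  induction s with
  | nil => intro a t; simp [pfx]
  | cons x r ih => intro a t; simp only [List.foldl_cons, PStep]; rw [ih]; simp [pfx]

theorem foldl_HStep_ne (l : List Int) : ∀ (a : List Int) (h : Int) (ha : a ≠ []),
    a.getLast ha = h → a ++ hl h l = l.foldl HStep a := by
  induction l with
  | nil => intro a h _ _; simp [hl]
  | cons p r ih =>
    intro a h ha hlast
    simp only [List.foldl_cons, HStep]
    rw [if_neg ha, PySem.List.pyGetD_neg_one a 0 ha, hlast]
    rw [← ih (a ++ [max h p]) (max h p) (by simp) (by simp)]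
    simp [hl]

theorem foldl_HStep_nil : ∀ (l : List Int),
    l.foldl HStep [] = match l with | [] => ([] : List Int) | p :: r => p :: hl p r := by
  intro l
  cases l with
  | nil => simp
  | cons p r =>
    have h1 : HStep [] p = [p] := by simp [HStep]
    rw [List.foldl_cons, h1, ← foldl_HStep_ne r [p] p (by simp) (by simp)]
    simp

theorem countP_hl_gt (m : Int) : ∀ (l : List Int) (h : Int), ¬ h ≤ m →
    (hl h l).countP (fun p => p ≤ m) = 0 := by
  intro l
  induction l with
  | nil => intro h _; simp [hl]
  | cons p r ih =>
    intro h hh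
    have hm : ¬ max h p ≤ m := by
      intro hle; exact hh (le_trans (le_max_left h p) hle)
    simp [hl, hm, ih (max h p) hm]

theorem countP_hl_pfx (m : Int) : ∀ (s : List Int) (t h : Int), h ≤ m →
    (hl h (pfx t s)).countP (fun p => p ≤ m) = gcount m s t := by
  intro s
  induction s with
  | nil => intro t h _; simp [pfx, hl, gcount]
  | cons x r ih =>
    intro t h hh
    simp only [pfx, hl, gcount, List.countP_cons]
    by_cases hx : x + t ≤ m
    · have hmx : max h (t + x) ≤ m := by
        apply max_le hh; omega
      rw [ih (t + x) (max h (t + x)) hmx]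
      simp [hmx, if_pos hx]
    · have hmx : ¬ max h (t + x) ≤ m := by
        intro hle
        exact hx (by have := le_trans (le_max_right h (t + x)) hle; omega)
      rw [countP_hl_gt m _ _ hmx]
      simp [hmx, if_neg hx]

theorem count_B_eq_gcount (m : Int) (s : List Int) :
    ((s.foldl PStep (([] : List Int), 0)).1.foldl HStep []).countP (fun p => p ≤ m) =
      gcount m s 0 := by
  rw [foldl_PStep s [] 0]
  simp only [List.nil_append]
  rw [foldl_HStep_nil]
  cases s with
  | nil => simp [pfx, gcount]
  | cons x r =>
    simp only [pfx, gcount, List.countP_cons]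
    by_cases hx : x + 0 ≤ m
    · have hx2 : x ≤ m := by omega
      have hx3 : (0 : Int) + x ≤ m := by omega
      rw [countP_hl_pfx m r (0 + x) (0 + x) hx3]
      simp [hx2]
    · have hx2 : ¬ x ≤ m := by omega
      have hx3 : ¬ (0 : Int) + x ≤ m := by omega
      rw [countP_hl_gt m _ _ hx3]
      simp [hx2]

theorem max?_id_reverse (l : List Int) :
    PySem.List.max? l.reverse (fun x => x) = PySem.List.max? l (fun x => x) := by
  cases h1 : PySem.List.max? l.reverse (fun x => x) with
  | none =>
    have hl0 : l = [] := by
      have := (PySem.List.max?_eq_none_iff _ _).mp h1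
      simpa using this
    subst hl0
    exact ((PySem.List.max?_eq_none_iff _ _).mpr rfl).symm
  | some a =>
    cases h2 : PySem.List.max? l (fun x => x) with
    | none =>
      have hl0 : l = [] := (PySem.List.max?_eq_none_iff _ _).mp h2
      subst hl0
      rw [List.reverse_nil] at h1
      rw [(PySem.List.max?_eq_none_iff _ _).mpr rfl] at h1
      exact absurd h1 (by simp)
    | some b =>
      have ha : a ∈ l := by
        have := PySem.List.max?_mem h1; simpa using this
      have hb : b ∈ l.reverse := by
        have := PySem.List.max?_mem h2; simpa using this
      have hab : a ≤ b := PySem.List.max?_isMax h2 a ha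
      have hba : b ≤ a := PySem.List.max?_isMax h1 b hb
      have : a = b := le_antisymm hab hba
      simp [this]

theorem F_eq_F_alt (sp_1 : List Int) (m : Int) : F sp_1 m = F_alt sp_1 m := by
  unfold F F_alt
  simp only []
  set s := PySem.List.sorted sp_1 (fun x => x) false with hs
  have hpair : s.Pairwise (· ≤ ·) := by
    have := PySem.List.sorted_pairwise sp_1 (fun x => x)
    simpa [hs] using this
  have hA := foldl_AStep_main m s hpair [] [] 0 0
  simp only [List.nil_append, zero_add] at hA
  have hB := count_B_eq_gcount m s
  rw [hA, hB]
  rw [PySem.List.slice_to_natCast, PySem.List.slice_from_natCast]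
  rw [max?_id_reverse, max?_id_reverse, List.sum_reverse]
  cases PySem.List.max? (List.take (gcount m s 0) s) (fun x => x) <;>
    cases PySem.List.max? (List.drop (gcount m s 0) s) (fun x => x) <;> rfl

-- ===== VERDICT (by name: the statement is the Claim_ definition above) =====
theorem F_spec : Claim_equal_F := by
  intro sp_1 m _ _
  exact F_eq_F_alt sp_1 m
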